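-- pv_equiv track=rewrite | github.com/Attta-pangestu/reporting_system_ifes_excel_editor | GUI_Report_Excel_/database_connector.py | _get_column_positions
-- ===== SOURCE A (Python) =====
-- def _get_column_positions(separator_line):
--     """Determine column positions from separator line"""
--     positions = []
--     start = 0
--
--     # Find groups of separator characters
--     i = 0
--     while i < len(separator_line):
--         if separator_line[i] in '=-':
--             # Found start of a column
--             start = i
--             # Find end of this column
--             while i < len(separator_line) and separator_line[i] in '=-':
--                 i += 1
--             end = i
--             positions.append((start, end))
--         else:
--             i += 1
--
--     return positions
-- ===== SOURCE B (Python) =====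
-- def _get_column_positions(separator_line):
--     """Determine column positions from separator line"""
--     # Staged boundary detection: build a boolean mask, then detect run starts
--     # (sep cell with no sep to its left) and run ends (sep cell with no sep to
--     # its right) by neighbour comparison, and zip the two boundary lists.
--     mask = [c in '=-' for c in separator_line]
--     n = len(mask)
--     starts = [i for i in range(n) if mask[i] and (i == 0 or not mask[i - 1])]
--     ends = [i + 1 for i in range(n) if mask[i] and (i == n - 1 or not mask[i + 1])]
--     return list(zip(starts, ends))
-- ===== Notes on version B (the rewrite author's own statement) =====
-- stated objective: alternative
-- what changed: Replaced A's stateful index-driven scan with nested while-loops by three staged comprehensions: a boolean mask, boundary detection of run starts/ends by comparing each cell with its left/right neighbour, and a zip of the two boundary lists.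
import Mathlib
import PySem

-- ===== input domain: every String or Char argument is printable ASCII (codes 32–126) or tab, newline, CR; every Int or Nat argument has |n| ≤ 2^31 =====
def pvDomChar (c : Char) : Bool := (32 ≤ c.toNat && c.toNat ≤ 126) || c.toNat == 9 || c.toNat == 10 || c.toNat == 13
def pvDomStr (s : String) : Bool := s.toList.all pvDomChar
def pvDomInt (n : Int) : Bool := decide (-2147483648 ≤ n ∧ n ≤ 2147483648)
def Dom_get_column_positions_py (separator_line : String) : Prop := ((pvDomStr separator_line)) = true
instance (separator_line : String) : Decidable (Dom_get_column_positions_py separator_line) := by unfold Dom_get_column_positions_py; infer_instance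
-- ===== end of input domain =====

-- B replaces A's stateful nested-while scan by staged comprehensions: mask, boundary
-- detection by neighbour comparison, and a zip of the start/end boundary lists (objective: alternative).

-- ===== PORT A =====
def pvIsSep (c : Char) : Bool := c == '=' || c == '-'

-- inner 'while i < len and separator_line[i] in "=-": i += 1'
def pvFindEnd (cs : List Char) (i : Nat) : Nat :=
  if h : i < cs.length then
    if pvIsSep cs[i] then pvFindEnd cs (i + 1) else i
  else i
termination_by cs.length - i

theorem pvFindEnd_ge (cs : List Char) (i : Nat) : i ≤ pvFindEnd cs i := by
  unfold pvFindEnd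
  split
  · split
    · exact Nat.le_trans (Nat.le_succ i) (pvFindEnd_ge cs (i + 1))
    · exact Nat.le_refl i
  · exact Nat.le_refl i
termination_by cs.length - i

-- outer while loop of A
def pvLoopA (cs : List Char) (i : Nat) (acc : List (Int × Int)) : List (Int × Int) :=
  if h : i < cs.length then
    if hs : pvIsSep cs[i] then
      let e := pvFindEnd cs i
      pvLoopA cs e (acc ++ [((i : Int), (e : Int))])
    else pvLoopA cs (i + 1) acc
  else acc
termination_by cs.length - i
decreasing_by
  · have : i + 1 ≤ pvFindEnd cs i := by
      conv_rhs => rw [pvFindEnd]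
      simp only [h, dif_pos, hs, if_pos]
      exact pvFindEnd_ge cs (i + 1)
    omega
  · omega

def get_column_positions_py (separator_line : String) : List (Int × Int) :=
  pvLoopA separator_line.toList 0 []

-- ===== PORT B =====
-- mask = [c in '=-' for c in separator_line]; starts/ends comprehensions over range(n); zip
def get_column_positions_py_alt (separator_line : String) : List (Int × Int) :=
  let mask := separator_line.toList.map (fun c => pvIsSep c)
  let n := mask.length
  let starts := (List.range n).filter
    (fun i => mask.getD i false && (decide (i = 0) || !(mask.getD (i - 1) false)))
  let ends := ((List.range n).filter
    (fun i => mask.getD i false && (decide (i = n - 1) || !(mask.getD (i + 1) false)))).map (fun i => i + 1)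
  (starts.zip ends).map (fun (p : Nat × Nat) => ((p.1 : Int), (p.2 : Int)))

-- ===== PRECONDITION & SPEC =====
def Spec_get_column_positions_py (separator_line : String) (out : List (Int × Int)) : Prop := out = get_column_positions_py_alt separator_line
instance (separator_line : String) (out : List (Int × Int)) : Decidable (Spec_get_column_positions_py separator_line out) := by unfold Spec_get_column_positions_py; infer_instance

-- ===== CLAIM (what is proved, stated in full; the proofs are below) =====
def Claim_equal_get_column_positions_py : Prop := ∀ (separator_line : String), Dom_get_column_positions_py separator_line → Spec_get_column_positions_py separator_line (get_column_positions_py separator_line)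

-- ===== LEMMAS AND PROOFS =====

-- common characterisation: the list of runs of separator characters in the suffix, offsets as Int
mutual
def pvRuns (k : Int) : List Char → List (Int × Int)
  | [] => []
  | c :: rest => if pvIsSep c then pvInRun k (k + 1) rest else pvRuns (k + 1) rest
def pvInRun (s k : Int) : List Char → List (Int × Int)
  | [] => [(s, k)]
  | c :: rest => if pvIsSep c then pvInRun s (k + 1) rest else (s, k) :: pvRuns (k + 1) rest
end

theorem pvFindEnd_inRun (cs : List Char) (k : Nat) (s : Int) :
    pvInRun s (k : Int) (cs.drop k) =
      (s, (pvFindEnd cs k : Int)) :: pvRuns (pvFindEnd cs k : Int) (cs.drop (pvFindEnd cs k)) := by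
  by_cases h : k < cs.length
  · have hd : cs.drop k = cs[k] :: cs.drop (k + 1) := List.drop_eq_getElem_cons h
    by_cases hs : pvIsSep cs[k]
    · have he : pvFindEnd cs k = pvFindEnd cs (k + 1) := by
        conv_lhs => rw [pvFindEnd]
        simp only [h, dif_pos, hs, if_pos]
      rw [hd, he]
      have ih := pvFindEnd_inRun cs (k + 1) s
      simpa [pvInRun, hs] using ih
    · have he : pvFindEnd cs k = k := by
        conv_lhs => rw [pvFindEnd]
        simp [h, hs]
      rw [he, hd]
      simp [pvInRun, pvRuns, hs]
  · have he : pvFindEnd cs k = k := by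
      conv_lhs => rw [pvFindEnd]
      simp [h]
    have hd : cs.drop k = [] := List.drop_eq_nil_of_le (by omega)
    rw [he, hd]
    simp [pvInRun, pvRuns]
termination_by cs.length - k
decreasing_by omega

theorem pvLoopA_runs (cs : List Char) (i : Nat) (acc : List (Int × Int)) :
    pvLoopA cs i acc = acc ++ pvRuns (i : Int) (cs.drop i) := by
  by_cases h : i < cs.length
  · have hd : cs.drop i = cs[i] :: cs.drop (i + 1) := List.drop_eq_getElem_cons h
    by_cases hs : pvIsSep cs[i]
    · have he1 : i + 1 ≤ pvFindEnd cs i := by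
        conv_rhs => rw [pvFindEnd]
        simp only [h, dif_pos, hs, if_pos]
        exact pvFindEnd_ge cs (i + 1)
      rw [pvLoopA]
      simp only [h, dif_pos, hs, dif_pos]
      rw [pvLoopA_runs cs (pvFindEnd cs i) (acc ++ [((i : Int), (pvFindEnd cs i : Int))])]
      have hr : pvRuns (i : Int) (cs.drop i) =
          ((i : Int), (pvFindEnd cs i : Int)) :: pvRuns (pvFindEnd cs i : Int) (cs.drop (pvFindEnd cs i)) := by
        rw [hd]
        simp only [pvRuns, hs, if_pos]
        have := pvFindEnd_inRun cs (i + 1) (i : Int)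
        have he : pvFindEnd cs i = pvFindEnd cs (i + 1) := by
          conv_lhs => rw [pvFindEnd]
          simp [h, hs]
        rw [he]
        push_cast at this ⊢
        exact this
      rw [hr]
      simp
    · rw [pvLoopA]
      simp only [h, dif_pos, hs]
      rw [pvLoopA_runs cs (i + 1) acc, hd]
      simp [pvRuns, hs]
  · have hd : cs.drop i = [] := List.drop_eq_nil_of_le (by omega)
    rw [pvLoopA, hd]
    simp [h, pvRuns]
termination_by cs.length - i
decreasing_by
  · omega
  · omega

-- structural counterparts of B's two boundary filters
def pvSIdx (prev : Bool) (k : Nat) : List Bool → List Nat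
  | [] => []
  | b :: rest => if b && !prev then k :: pvSIdx b (k + 1) rest else pvSIdx b (k + 1) rest

def pvEIdx (k : Nat) : List Bool → List Nat
  | [] => []
  | b :: rest => if b && !(rest.getD 0 false) then k :: pvEIdx (k + 1) rest else pvEIdx (k + 1) rest

theorem pvSIdx_shift (m : List Bool) (prev : Bool) (k : Nat) :
    pvSIdx prev (k + 1) m = (pvSIdx prev k m).map Nat.succ := by
  induction m generalizing prev k with
  | nil => rfl
  | cons b rest ih =>
    simp only [pvSIdx]
    split <;> simp [ih]

theorem pvEIdx_shift (m : List Bool) (k : Nat) :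
    pvEIdx (k + 1) m = (pvEIdx k m).map Nat.succ := by
  induction m generalizing k with
  | nil => rfl
  | cons b rest ih =>
    simp only [pvEIdx]
    split <;> simp [ih]

theorem pvFiltS (m : List Bool) (prev : Bool) :
    (List.range m.length).filter
      (fun i => m.getD i false && (if i = 0 then !prev else !(m.getD (i - 1) false)))
      = pvSIdx prev 0 m := by
  induction m generalizing prev with
  | nil => rfl
  | cons b rest ih =>
    rw [List.length_cons, List.range_succ_eq_map, List.filter_cons, List.filter_map]
    have hfun : ((fun i => (b :: rest).getD i false &&
          (if i = 0 then !prev else !((b :: rest).getD (i - 1) false))) ∘ Nat.succ)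
        = (fun i => rest.getD i false && (if i = 0 then !b else !(rest.getD (i - 1) false))) := by
      funext i
      cases i <;> simp
    rw [hfun, ih b]
    simp only [pvSIdx, List.getD_cons_zero]
    rw [pvSIdx_shift]
    split <;> simp_all

theorem pvFiltE (m : List Bool) :
    (List.range m.length).filter (fun i => m.getD i false && !(m.getD (i + 1) false))
      = pvEIdx 0 m := by
  induction m with
  | nil => rfl
  | cons b rest ih =>
    rw [List.length_cons, List.range_succ_eq_map, List.filter_cons, List.filter_map]
    have hfun : ((fun i => (b :: rest).getD i false && !((b :: rest).getD (i + 1) false)) ∘ Nat.succ)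
        = (fun i => rest.getD i false && !(rest.getD (i + 1) false)) := by
      funext i
      simp
    rw [hfun, ih]
    simp only [pvEIdx, List.getD_cons_zero, List.getD_cons_succ]
    rw [pvEIdx_shift rest 0]

-- the zip of the two boundary lists is exactly the run list
mutual
theorem pvZipOut (cs : List Char) (k : Nat) :
    ((pvSIdx false k (cs.map pvIsSep)).zip ((pvEIdx k (cs.map pvIsSep)).map (· + 1))).map
        (fun (p : Nat × Nat) => ((p.1 : Int), (p.2 : Int))) = pvRuns (k : Int) cs := by
  match cs with
  | [] => rfl
  | c :: rest =>
    by_cases hs : pvIsSep c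
    · simp only [List.map_cons, pvSIdx, pvRuns, hs, Bool.not_false, Bool.and_true, if_pos]
      have := pvZipIn rest k k
      push_cast at this ⊢
      exact this
    · simp only [List.map_cons, pvSIdx, pvEIdx, pvRuns, hs, Bool.false_and, if_neg,
        Bool.not_eq_true]
      have := pvZipOut rest (k + 1)
      push_cast at this ⊢
      exact this
termination_by (cs.length, 0)

theorem pvZipIn (cs : List Char) (k s : Nat) :
    (((s : Nat) :: pvSIdx true (k + 1) (cs.map pvIsSep)).zip
        ((pvEIdx k (true :: cs.map pvIsSep)).map (· + 1))).map
        (fun (p : Nat × Nat) => ((p.1 : Int), (p.2 : Int))) = pvInRun (s : Int) ((k : Int) + 1) cs := by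
  match cs with
  | [] => simp [pvEIdx, pvSIdx, pvInRun]
  | c :: rest =>
    by_cases hs : pvIsSep c
    · simp only [List.map_cons, pvSIdx, pvEIdx, pvInRun, hs, Bool.not_true, Bool.and_false,
        List.getD_cons_zero, Bool.true_and, reduceIte]
      have := pvZipIn rest (k + 1) s
      push_cast at this ⊢
      convert this using 3
    · have := pvZipOut rest (k + 2)
      simp only [List.map_cons, pvSIdx, pvEIdx, pvInRun, hs, List.getD_cons_zero,
        Bool.false_and, Bool.not_true, Bool.false_eq_true, if_false,
        Bool.not_false, Bool.and_self, if_pos, List.zip_cons_cons]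
      push_cast at this ⊢
      refine List.cons_eq_cons.mpr ⟨rfl, ?_⟩
      have h2 : ((k : ℤ) + 1 + 1) = (k : ℤ) + 2 := by ring
      rw [h2]
      exact this
  termination_by (cs.length, 1)
end

-- ===== VERDICT (by name: the statement is the Claim_ definition above) =====
theorem get_column_positions_py_spec : Claim_equal_get_column_positions_py := by
  intro str _
  unfold Spec_get_column_positions_py get_column_positions_py
  simp only [get_column_positions_py_alt]
  have hA := pvLoopA_runs str.toList 0 []
  simp only [List.drop_zero, List.nil_append, Nat.cast_zero] at hA
  rw [hA]
  have hS : (List.range (str.toList.map (fun c => pvIsSep c)).length).filter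
      (fun i => (str.toList.map (fun c => pvIsSep c)).getD i false &&
        (decide (i = 0) || !((str.toList.map (fun c => pvIsSep c)).getD (i - 1) false)))
      = pvSIdx false 0 (str.toList.map (fun c => pvIsSep c)) := by
    rw [← pvFiltS (str.toList.map (fun c => pvIsSep c)) false]
    apply List.filter_congr
    intro i _
    cases i <;> simp
  have hE : (List.range (str.toList.map (fun c => pvIsSep c)).length).filter
      (fun i => (str.toList.map (fun c => pvIsSep c)).getD i false &&
        (decide (i = (str.toList.map (fun c => pvIsSep c)).length - 1) ||
          !((str.toList.map (fun c => pvIsSep c)).getD (i + 1) false)))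
      = pvEIdx 0 (str.toList.map (fun c => pvIsSep c)) := by
    rw [← pvFiltE (str.toList.map (fun c => pvIsSep c))]
    apply List.filter_congr
    intro i hi
    simp only [List.mem_range] at hi
    by_cases h1 : i = (str.toList.map (fun c => pvIsSep c)).length - 1
    · have h2 : (str.toList.map (fun c => pvIsSep c)).getD (i + 1) false = false :=
        List.getD_eq_default _ _ (by omega)
      simp only [h2, Bool.not_false, Bool.or_true, Bool.and_true]
    · have h2 : decide (i = (str.toList.map (fun c => pvIsSep c)).length - 1) = false := by
        simpa using h1
      simp only [h2, Bool.false_or]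
  rw [hS, hE]
  exact (pvZipOut str.toList 0).symm
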